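-- pv_equiv track=rewrite | github.com/WonHwang/1D1P_2 | P120882.py | solution
-- ===== SOURCE A (Python) =====
-- def solution(score):
--     answer = [0] * len(score)
--     score_ = sorted(score, reverse=True, key=lambda x:x[0]+x[1])
--     rank = {}
--     cnt = 1
--     for sc in score_:
--         if rank.get(sum(sc)):
--             cnt += 1
--         else:
--             rank[sum(sc)] = cnt
--             cnt += 1
--     for i in range(len(score)):
--         answer[i] = rank[sum(score[i])]
--
--     return answer
-- ===== SOURCE B (Python) =====
-- def solution(score):
--     sums = [sum(x) for x in score]
--     pos = [sum(1 for j, y in enumerate(score)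
--                if y[0] + y[1] > x[0] + x[1] or (y[0] + y[1] == x[0] + x[1] and j < i))
--            for i, x in enumerate(score)]
--     return [1 + min(p for p, t in zip(pos, sums) if t == s) for s in sums]
-- ===== Notes on version B (the rewrite author's own statement) =====
-- stated objective: alternative
-- what changed: B does not sort and builds no rank dict: it computes each element's competition position directly by counting, for each element, how many elements come strictly before it (greater pair-sum, or equal pair-sum and earlier index), then takes 1 + the minimum such position among elements sharing the same total sum.
import Mathlib
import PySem

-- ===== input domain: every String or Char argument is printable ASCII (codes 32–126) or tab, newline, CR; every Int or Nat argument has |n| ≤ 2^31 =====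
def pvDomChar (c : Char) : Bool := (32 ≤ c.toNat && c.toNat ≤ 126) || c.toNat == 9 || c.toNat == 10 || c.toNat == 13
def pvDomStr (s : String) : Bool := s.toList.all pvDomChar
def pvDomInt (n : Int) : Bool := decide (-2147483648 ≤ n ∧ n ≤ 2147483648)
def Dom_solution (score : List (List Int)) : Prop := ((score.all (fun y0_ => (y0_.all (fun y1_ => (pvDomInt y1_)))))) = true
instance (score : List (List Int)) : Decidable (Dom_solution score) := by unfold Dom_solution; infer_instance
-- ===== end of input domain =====

-- B drops A's sort, rank dict and counter entirely: it counts, for each element, how many elements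
-- precede it in competition order and takes the minimum position among equal total sums; objective: alternative.


-- ===== PORT A =====
-- the pair-sum x[0] + x[1] (A's sort key lambda; B's inline comparisons); the defaults are only
-- reached where Python raises IndexError (outside Pre_)
def pvKey (x : List Int) : Int := PySem.List.pyGetD x 0 0 + PySem.List.pyGetD x 1 0

-- one iteration of A's rank-building loop; state = (rank, cnt); 'if rank.get(sum(sc)):' is the
-- truthiness test on the stored value (stored values are always ≥ 1) vs None→0
def pvStep (st : PySem.Dict Int Int × Int) (sc : List Int) : PySem.Dict Int Int × Int :=
  if st.1.getD sc.sum 0 ≠ 0 then (st.1, st.2 + 1)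
  else (st.1.insert sc.sum st.2, st.2 + 1)

def solution (score : List (List Int)) : List Int :=
  let score_ := PySem.List.sorted score (fun x => pvKey x) true
  let st := score_.foldl pvStep (PySem.Dict.empty, 1)
  -- rank[sum(score[i])] : the key is always present (every sum was visited); getD 0 marks KeyError
  (PySem.List.pyRange 0 (score.length : Int) 1).map
    (fun i => st.1.getD (PySem.List.pyGetD score i []).sum 0)

-- ===== PORT B =====
-- Source B's condition 'y[0]+y[1] > x[0]+x[1] or (y[0]+y[1] == x[0]+x[1] and j < i)' for q = (j, y),
-- p = (i, x): q comes strictly before p in competition order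
def pvBefore (q p : Int × List Int) : Bool :=
  decide (pvKey p.2 < pvKey q.2) || (decide (pvKey q.2 = pvKey p.2) && decide (q.1 < p.1))

def solution_alt (score : List (List Int)) : List Int :=
  let sums := score.map (fun x => x.sum)
  -- sum(1 for j, y in enumerate(score) if …) is the count of enumerate entries satisfying the condition
  let pos := (PySem.List.enumerate score 0).map (fun p =>
      ((((PySem.List.enumerate score 0).filter (fun q => pvBefore q p)).length : Nat) : Int))
  -- min(p for p, t in zip(pos, sums) if t == s) : ValueError impossible (the element itself qualifies); getD 0 marks it
  sums.map (fun s =>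
    1 + (PySem.List.min? (((pos.zip sums).filter (fun pt => pt.2 == s)).map Prod.fst)
          (fun y => y)).getD 0)

-- ===== PRECONDITION & SPEC =====
-- Pre_ excludes exactly the inputs on which A raises IndexError in the sort key:
-- an inner list with fewer than two entries (B raises there too)
def Pre_solution (score : List (List Int)) : Prop := ∀ l ∈ score, 2 ≤ l.length
instance (score : List (List Int)) : Decidable (Pre_solution score) := by unfold Pre_solution; infer_instance
def pvWitness_solution : List (List Int) := [[1, 2], [3, 4], [1, 2], [5, -1]]

def Spec_solution (score : List (List Int)) (out : List Int) : Prop := out = solution_alt score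
instance (score : List (List Int)) (out : List Int) : Decidable (Spec_solution score out) := by unfold Spec_solution; infer_instance

-- ===== CLAIM (what is proved, stated in full; the proofs are below) =====
def Claim_equal_solution : Prop := ∀ (score : List (List Int)), Dom_solution score → Pre_solution score → Spec_solution score (solution score)

-- ===== LEMMAS AND PROOFS =====

-- the decorated list (original index, element) and its stable-descending insertion sort
def pvEl (score : List (List Int)) : List (Int × List Int) := PySem.List.enumerate score 0

def pvYs (score : List (List Int)) : List (Int × List Int) :=
  (pvEl score).foldl (fun acc p => PySem.List.insertBy pvBefore p acc) []

-- order facts about pvBefore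
lemma pvBefore_trans {a b c : Int × List Int} (h1 : pvBefore a b = true) (h2 : pvBefore b c = true) :
    pvBefore a c = true := by
  simp only [pvBefore, Bool.or_eq_true, Bool.and_eq_true, decide_eq_true_eq] at *
  rcases h1 with h1 | ⟨h1, h1'⟩ <;> rcases h2 with h2 | ⟨h2, h2'⟩
  · exact Or.inl (lt_trans h2 h1)
  · exact Or.inl (h2 ▸ h1)
  · exact Or.inl (h1 ▸ h2)
  · exact Or.inr ⟨h1.trans h2, lt_trans h1' h2'⟩

lemma pvBefore_total {p q : Int × List Int} (h : p.1 ≠ q.1) :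
    pvBefore p q = true ∨ pvBefore q p = true := by
  simp only [pvBefore, Bool.or_eq_true, Bool.and_eq_true, decide_eq_true_eq]
  rcases lt_trichotomy (pvKey p.2) (pvKey q.2) with hk | hk | hk
  · exact Or.inr (Or.inl hk)
  · rcases lt_or_gt_of_ne h with hi | hi
    · exact Or.inl (Or.inr ⟨hk, hi⟩)
    · exact Or.inr (Or.inr ⟨hk.symm, hi⟩)
  · exact Or.inl (Or.inl hk)

lemma pvBefore_asymm {p q : Int × List Int} (h : pvBefore p q = true) : ¬ pvBefore q p = true := by
  simp only [pvBefore, Bool.or_eq_true, Bool.and_eq_true, decide_eq_true_eq] at *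
  rcases h with h | ⟨h, h'⟩ <;> rintro (h2 | ⟨h2, h2'⟩) <;> omega

lemma pvBefore_irrefl (p : Int × List Int) : ¬ pvBefore p p = true := by
  simp [pvBefore]

-- insertBy is a permutation of consing
lemma pv_insertBy_perm {α : Type} (before : α → α → Bool) (x : α) (ys : List α) :
    (PySem.List.insertBy before x ys).Perm (x :: ys) := by
  induction ys with
  | nil => simp [PySem.List.insertBy]
  | cons y t ih =>
    simp only [PySem.List.insertBy]
    split
    · exact List.Perm.refl _
    · exact (List.Perm.cons y ih).trans (List.Perm.swap x y t)

-- STABILITY, step: inserting the freshest index with the decorated comparison projects to the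
-- plain reverse-sort insertion (the tie clause never fires against older indices)
lemma pv_insert_snd (acc : List (Int × List Int)) (n : Int) (x : List Int)
    (h : ∀ q ∈ acc, q.1 < n) :
    (PySem.List.insertBy pvBefore (n, x) acc).map Prod.snd
      = PySem.List.insertBy (fun a b => decide (pvKey b < pvKey a)) x (acc.map Prod.snd) := by
  induction acc with
  | nil => simp [PySem.List.insertBy]
  | cons q t ih =>
    have hq : q.1 < n := h q (by simp)
    have hb : pvBefore (n, x) q = decide (pvKey q.2 < pvKey x) := by
      simp only [pvBefore]
      have : ¬ ((n, x).1 < q.1) := by simp; omega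
      simp [this]
    simp only [PySem.List.insertBy, List.map_cons, hb]
    split
    · simp
    · simp [ih (fun r hr => h r (by simp [hr]))]

-- STABILITY, fold: the decorated insertion sort of the enumerated list projects to A's sort
lemma pv_fold_snd (l : List (List Int)) : ∀ (n : Int) (acc : List (Int × List Int)),
    (∀ q ∈ acc, q.1 < n) →
    ((PySem.List.enumerate l n).foldl (fun acc p => PySem.List.insertBy pvBefore p acc) acc).map Prod.snd
      = l.foldl (fun acc x => PySem.List.insertBy (fun a b => decide (pvKey b < pvKey a)) x acc)
          (acc.map Prod.snd) := by
  induction l with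
  | nil => intro n acc _; simp [PySem.List.enumerate]
  | cons x t ih =>
    intro n acc h
    simp only [PySem.List.enumerate, List.foldl_cons]
    rw [← pv_insert_snd acc n x h]
    exact ih (n + 1) _ (by
      intro q hq
      rcases (PySem.List.mem_insertBy _ _ _ _).mp hq with rfl | hq
      · simp
      · exact lt_trans (h q hq) (by omega))

lemma pv_sorted_eq (score : List (List Int)) :
    (pvYs score).map Prod.snd = PySem.List.sorted score (fun x => pvKey x) true := by
  rw [PySem.List.sorted_rev_eq_foldl_insertBy]
  simpa using pv_fold_snd score 0 [] (by simp)

lemma pv_ys_perm (score : List (List Int)) : (pvYs score).Perm (pvEl score) := by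
  unfold pvYs
  have : ∀ (el acc : List (Int × List Int)),
      (el.foldl (fun acc p => PySem.List.insertBy pvBefore p acc) acc).Perm (acc ++ el) := by
    intro el
    induction el with
    | nil => simp
    | cons p t ih =>
      intro acc
      simp only [List.foldl_cons]
      refine (ih _).trans ?_
      exact (((pv_insertBy_perm pvBefore p acc).append_right t).trans
        (List.perm_middle (a := p) (l₁ := acc) (l₂ := t)).symm)
  simpa using this (pvEl score) []

-- inserting an element with a fresh index preserves pairwise strict order
lemma pv_insertBy_pairwise (p : Int × List Int) (acc : List (Int × List Int))
    (hp : acc.Pairwise (fun a b => pvBefore a b = true))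
    (hfr : ∀ q ∈ acc, p.1 ≠ q.1) :
    (PySem.List.insertBy pvBefore p acc).Pairwise (fun a b => pvBefore a b = true) := by
  induction acc with
  | nil => simp [PySem.List.insertBy]
  | cons q t ih =>
    rcases List.pairwise_cons.mp hp with ⟨hq, hpt⟩
    simp only [PySem.List.insertBy]
    split
    · rename_i hb
      refine List.pairwise_cons.mpr ⟨?_, hp⟩
      intro r hr
      rcases List.mem_cons.mp hr with rfl | hr
      · exact hb
      · exact pvBefore_trans hb (hq r hr)
    · rename_i hb
      refine List.pairwise_cons.mpr ⟨?_, ih hpt (fun r hr => hfr r (by simp [hr]))⟩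
      intro r hr
      rcases (PySem.List.mem_insertBy _ _ _ _).mp hr with rfl | hr
      · rcases pvBefore_total (hfr q (by simp)) with h | h
        · exact absurd h (by simpa using hb)
        · exact h
      · exact hq r hr

lemma pv_ys_pairwise (score : List (List Int)) :
    (pvYs score).Pairwise (fun a b => pvBefore a b = true) := by
  unfold pvYs
  have : ∀ (l : List (List Int)) (n : Int) (acc : List (Int × List Int)),
      acc.Pairwise (fun a b => pvBefore a b = true) → (∀ q ∈ acc, q.1 < n) →
      ((PySem.List.enumerate l n).foldl (fun acc p => PySem.List.insertBy pvBefore p acc) acc).Pairwise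
        (fun a b => pvBefore a b = true) := by
    intro l
    induction l with
    | nil => intro n acc h _; simpa [PySem.List.enumerate] using h
    | cons x t ih =>
      intro n acc h hlt
      simp only [PySem.List.enumerate, List.foldl_cons]
      refine ih (n + 1) _ (pv_insertBy_pairwise _ _ h (fun q hq => by have := hlt q hq; simp; omega)) ?_
      intro q hq
      rcases (PySem.List.mem_insertBy _ _ _ _).mp hq with rfl | hq
      · simp
      · exact lt_trans (hlt q hq) (by omega)
  simpa using this score 0 [] (by simp) (by simp)

-- POSITION: in the sorted decorated list, the number of elements that come strictly before ys[m] is m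
lemma pv_count_pos (score : List (List Int)) (m : Nat) (hm : m < (pvYs score).length) :
    (pvEl score).countP (fun q => pvBefore q (pvYs score)[m]) = m := by
  have hperm := (pv_ys_perm score).symm
  have hpw := pv_ys_pairwise score
  have hpwge : ∀ i j (hi : i < (pvYs score).length) (hj : j < (pvYs score).length), i < j →
      pvBefore (pvYs score)[i] (pvYs score)[j] = true :=
    fun i j hi hj hij => List.pairwise_iff_getElem.mp hpw i j hi hj hij
  rw [hperm.countP_eq]
  have hdrop : List.drop m (pvYs score) = (pvYs score)[m] :: List.drop (m + 1) (pvYs score) := by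
    rw [List.getElem_cons_drop]
  have hsplit : pvYs score = List.take m (pvYs score) ++ (pvYs score)[m] :: List.drop (m + 1) (pvYs score) := by
    rw [← hdrop, List.take_append_drop]
  obtain ⟨v, hv⟩ : ∃ v, (pvYs score)[m] = v := ⟨_, rfl⟩
  have h1 : (List.take m (pvYs score)).countP (fun q => pvBefore q v) = (List.take m (pvYs score)).length := by
    apply List.countP_eq_length.mpr
    intro q hq
    rcases List.mem_take_iff_getElem.mp hq with ⟨j, hj, rfl⟩
    rw [← hv]
    simpa using hpwge j m (by omega) hm (by omega)
  have h2 : (List.drop (m + 1) (pvYs score)).countP (fun q => pvBefore q v) = 0 := by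
    apply List.countP_eq_zero.mpr
    intro q hq
    rcases List.mem_drop_iff_getElem.mp hq with ⟨j, hj, rfl⟩
    have := hpwge m (m + 1 + j) hm (by omega) (by omega)
    rw [← hv]
    simpa using pvBefore_asymm this
  have h3 : ¬ (pvBefore v v = true) := by rw [← hv]; exact pvBefore_irrefl _
  rw [hv] at hsplit
  rw [hv]
  conv_lhs => rw [hsplit]
  rw [List.countP_append, List.countP_cons, h1, h2]
  simp only [List.length_take, h3]
  simp
  omega

-- the enumerated list projects back to the original
lemma pv_el_snd (score : List (List Int)) : (pvEl score).map Prod.snd = score := by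
  unfold pvEl
  have : ∀ (l : List (List Int)) (n : Int), (PySem.List.enumerate l n).map Prod.snd = l := by
    intro l
    induction l with
    | nil => intro n; simp [PySem.List.enumerate]
    | cons x t ih => intro n; simp [PySem.List.enumerate, ih]
  exact this score 0

-- rank-building invariant (A side): folding pvStep over the rest 'l' (counter = 1 + |prefix p|) of
-- the sorted list, the dict maps each sum seen in p to 1 + (first index of that sum in the whole list)
lemma pv_build (l : List (List Int)) : ∀ (p : List (List Int)) (d : PySem.Dict Int Int),
    (∀ k : Int, d.get? k = if k ∈ p.map List.sum then
        (PySem.List.index? ((p ++ l).map List.sum) k).map (fun j => 1 + (j : Int)) else none) →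
    ∀ k : Int, ((l.foldl pvStep (d, 1 + (p.length : Int))).1).get? k
      = if k ∈ (p ++ l).map List.sum then
          (PySem.List.index? ((p ++ l).map List.sum) k).map (fun j => 1 + (j : Int)) else none := by
  induction l with
  | nil => intro p d hd k; simpa using hd k
  | cons sc t ih =>
    intro p d hd
    have happ : p ++ sc :: t = (p ++ [sc]) ++ t := by simp
    have hlen : 1 + (p.length : Int) + 1 = 1 + ((p ++ [sc]).length : Int) := by simp; ring
    by_cases hmem : sc.sum ∈ p.map List.sum
    · have hgd : d.getD sc.sum 0 ≠ 0 := by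
        rw [PySem.Dict.getD_eq_get?_getD, hd sc.sum, if_pos hmem]
        have : sc.sum ∈ (p ++ sc :: t).map List.sum := by simp [List.map_append]
        obtain ⟨j, hj⟩ := Option.isSome_iff_exists.mp
          ((PySem.List.index?_isSome_iff _ _).mpr this)
        rw [hj]; simp; omega
      have hstep : pvStep (d, 1 + (p.length : Int)) sc = (d, 1 + (p.length : Int) + 1) := by
        simp [pvStep, hgd]
      have hd' : ∀ k : Int, d.get? k = if k ∈ (p ++ [sc]).map List.sum then
          (PySem.List.index? (((p ++ [sc]) ++ t).map List.sum) k).map (fun j => 1 + (j : Int)) else none := by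
        intro k
        rw [← happ, hd k]
        by_cases h1 : k ∈ p.map List.sum
        · rw [if_pos h1, if_pos (by simp only [List.map_append, List.mem_append]; exact Or.inl h1)]
        · rw [if_neg h1, if_neg (by
            simp only [List.map_append, List.mem_append]
            rintro (h | h)
            · exact h1 h
            · simp at h; exact h1 (h ▸ hmem))]
      intro k
      rw [happ] at *
      have := ih (p ++ [sc]) d hd' k
      rw [List.foldl_cons, hstep, hlen]
      exact this
    · have hget : d.get? sc.sum = none := by rw [hd sc.sum, if_neg hmem]
      have hgd : ¬ (d.getD sc.sum 0 ≠ 0) := by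
        rw [PySem.Dict.getD_eq_get?_getD, hget]; simp
      have hstep : pvStep (d, 1 + (p.length : Int)) sc
          = (d.insert sc.sum (1 + (p.length : Int)), 1 + (p.length : Int) + 1) := by
        simp [pvStep, hgd]
      have hidx : PySem.List.index? ((p ++ sc :: t).map List.sum) sc.sum = some p.length := by
        exact (PySem.List.index?_eq_some_iff _ _ _).mpr
          ⟨p.map List.sum, t.map List.sum, by simp, by simp, hmem⟩
      have hd' : ∀ k : Int, (d.insert sc.sum (1 + (p.length : Int))).get? k
          = if k ∈ (p ++ [sc]).map List.sum then
              (PySem.List.index? (((p ++ [sc]) ++ t).map List.sum) k).map (fun j => 1 + (j : Int)) else none := by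
        intro k
        rw [← happ]
        by_cases hk : k = sc.sum
        · subst hk
          rw [PySem.Dict.get?_insert_self, if_pos (by simp [List.map_append]), hidx]
          simp
        · rw [PySem.Dict.get?_insert_of_ne _ _ hk, hd k]
          by_cases h1 : k ∈ p.map List.sum
          · rw [if_pos h1, if_pos (by simp only [List.map_append, List.mem_append]; exact Or.inl h1)]
          · rw [if_neg h1, if_neg (by
              simp only [List.map_append, List.mem_append]
              rintro (h | h)
              · exact h1 h
              · simp at h; exact hk h)]
      intro k
      rw [happ] at *
      have := ih (p ++ [sc]) (d.insert sc.sum (1 + (p.length : Int))) hd' k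
      rw [List.foldl_cons, hstep, hlen]
      exact this

-- B's inner minimum equals the first index of s among the sorted sums
lemma pv_min_eq_index (score : List (List Int)) (s : Int) (j : Nat)
    (hj : PySem.List.index? ((PySem.List.sorted score (fun x => pvKey x) true).map List.sum) s = some j) :
    PySem.List.min?
      (((((pvEl score).map (fun p => ((((pvEl score).filter (fun q => pvBefore q p)).length : Nat) : Int))).zip
          (score.map (fun x => x.sum))).filter (fun pt => pt.2 == s)).map Prod.fst)
      (fun y => y) = some ((j : Nat) : Int) := by
  have hsnd := pv_sorted_eq score
  have hperm := pv_ys_perm score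
  have hlen : (pvYs score).length = (PySem.List.sorted score (fun x => pvKey x) true).length := by
    rw [← hsnd, List.length_map]
  obtain ⟨hk, hval, hfirst⟩ := PySem.List.getElem_of_index?_eq_some hj
  rw [List.length_map] at hk
  -- the element at sorted position m has sum (pvYs score)[m].2.sum
  have hsum_at : ∀ (m : Nat) (hm : m < (pvYs score).length),
      ((PySem.List.sorted score (fun x => pvKey x) true).map List.sum)[m]'(by rw [List.length_map, ← hlen]; exact hm)
        = (pvYs score)[m].2.sum := by
    intro m hm
    simp only [← hsnd, List.map_map, List.getElem_map]
    rfl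
  -- the candidate list is a map over the filtered decorated list
  have hsums : score.map (fun x => x.sum) = (pvEl score).map (fun p => p.2.sum) := by
    conv_lhs => rw [← pv_el_snd score]
    rw [List.map_map]
    rfl
  have hzip : ((pvEl score).map (fun p => ((((pvEl score).filter (fun q => pvBefore q p)).length : Nat) : Int))).zip
        (score.map (fun x => x.sum))
      = (pvEl score).map (fun p => (((((pvEl score).filter (fun q => pvBefore q p)).length : Nat) : Int), p.2.sum)) := by
    rw [hsums, List.zip_map']
  rw [hzip, List.filter_map, List.map_map]
  -- position of a decorated element: its filter count is its index in pvYs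
  have hpos : ∀ p ∈ pvEl score, ∀ (m : Nat) (hm : m < (pvYs score).length), (pvYs score)[m] = p →
      (((pvEl score).filter (fun q => pvBefore q p)).length : Nat) = m := by
    intro p _ m hm hpm
    rw [← List.countP_eq_length_filter, ← hpm]
    exact pv_count_pos score m hm
  have hjlt : j < (pvYs score).length := by rw [hlen]; exact hk
  -- (j : Int) is a candidate: the element at sorted position j has sum s
  have hjmem : ((j : Nat) : Int) ∈ ((pvEl score).filter (fun p => decide (p.2.sum = s))).map
      (fun p => ((((pvEl score).filter (fun q => pvBefore q p)).length : Nat) : Int)) := by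
    refine List.mem_map.mpr ⟨(pvYs score)[j], List.mem_filter.mpr ⟨?_, ?_⟩, ?_⟩
    · exact hperm.mem_iff.mp (List.getElem_mem hjlt)
    · have := hsum_at j hjlt
      rw [hval] at this
      simp [← this]
    · rw [hpos (pvYs score)[j] (hperm.mem_iff.mp (List.getElem_mem hjlt)) j hjlt rfl]
  -- every candidate is ≥ j: earlier sorted positions do not carry sum s
  have hlb : ∀ c ∈ ((pvEl score).filter (fun p => decide (p.2.sum = s))).map
      (fun p => ((((pvEl score).filter (fun q => pvBefore q p)).length : Nat) : Int)),
      ((j : Nat) : Int) ≤ c := by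
    intro c hc
    obtain ⟨p, hpf, rfl⟩ := List.mem_map.mp hc
    obtain ⟨hpel, hps⟩ := List.mem_filter.mp hpf
    obtain ⟨m, hm, hpm⟩ := List.getElem_of_mem (hperm.mem_iff.mpr hpel)
    rw [hpos p hpel m hm hpm]
    have hjm : j ≤ m := by
      by_contra hmj
      exact hfirst m (by omega) (by rw [hsum_at m hm, hpm]; simpa using hps)
    exact_mod_cast hjm
  -- the minimum of a list containing j and bounded below by j is j
  have hne : ((pvEl score).filter (fun p => decide (p.2.sum = s))).map
      (fun p => ((((pvEl score).filter (fun q => pvBefore q p)).length : Nat) : Int)) ≠ [] :=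
    List.ne_nil_of_mem hjmem
  obtain ⟨r, hr⟩ : ∃ r, PySem.List.min? (((pvEl score).filter (fun p => decide (p.2.sum = s))).map
      (fun p => ((((pvEl score).filter (fun q => pvBefore q p)).length : Nat) : Int))) (fun y => y) = some r := by
    rcases h : PySem.List.min? _ (fun y => y) with _ | r
    · exact absurd ((PySem.List.min?_eq_none_iff _ _).mp h) hne
    · exact ⟨r, rfl⟩
  have h1 : r ≤ ((j : Nat) : Int) := PySem.List.min?_isMin hr _ hjmem
  have h2 : ((j : Nat) : Int) ≤ r := hlb r (PySem.List.min?_mem hr)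
  have : r = ((j : Nat) : Int) := le_antisymm h1 h2
  rw [← this]
  convert hr using 3

-- ===== VERDICT (by name: the statement is the Claim_ definition above) =====
theorem solution_spec : Claim_equal_solution := by
  intro score _ _
  unfold Spec_solution solution solution_alt
  set score_ := PySem.List.sorted score (fun x => pvKey x) true with hs
  have hperm : score_.Perm score := PySem.List.sorted_perm score (fun x => pvKey x) true
  have hrank := pv_build score_ [] PySem.Dict.empty
    (by intro k; simp [PySem.Dict.get?_empty])
  simp only [List.nil_append, List.length_nil, Nat.cast_zero, add_zero] at hrank
  -- A's answer loop is a map over score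
  have hA : (PySem.List.pyRange 0 (score.length : Int) 1).map
      (fun i => ((score_.foldl pvStep (PySem.Dict.empty, 1)).1).getD (PySem.List.pyGetD score i []).sum 0)
      = score.map (fun sc => ((score_.foldl pvStep (PySem.Dict.empty, 1)).1).getD sc.sum 0) := by
    conv_lhs => rw [show (fun i => ((score_.foldl pvStep (PySem.Dict.empty, 1)).1).getD (PySem.List.pyGetD score i []).sum 0)
        = (fun sc : List Int => ((score_.foldl pvStep (PySem.Dict.empty, 1)).1).getD sc.sum 0) ∘ (fun i => PySem.List.pyGetD score i []) from rfl,
      ← List.map_map, PySem.List.map_pyGetD_pyRange_zero' score ([] : List Int)]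
  rw [hA]
  -- B's outer loop is a map over score too
  rw [List.map_map]
  apply List.map_congr_left
  intro sc hsc
  have hmem : sc.sum ∈ score_.map List.sum :=
    List.mem_map.mpr ⟨sc, hperm.mem_iff.mpr hsc, rfl⟩
  obtain ⟨j, hj⟩ := Option.isSome_iff_exists.mp ((PySem.List.index?_isSome_iff _ _).mpr hmem)
  have hmin := pv_min_eq_index score sc.sum j (hs ▸ hj)
  unfold pvEl at hmin
  rw [PySem.Dict.getD_eq_get?_getD, hrank sc.sum, if_pos hmem, hj]
  simp only [Function.comp_apply]
  rw [hmin]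
  simp [add_comm]
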